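-- pv_equiv track=rewrite | github.com/ArchdukeViel/NovelAITranslator2Book | src/novelai/tui/screens/library.py | _parse_library_selection
-- ===== SOURCE A (Python) =====
-- def _parse_library_selection(selection: str, max_value: int) -> list[int] | None:
--     values: set[int] = set()
--     for part in selection.split(","):
--         token = part.strip()
--         if not token:
--             continue
--         if "-" in token:
--             start_text, end_text = token.split("-", 1)
--             if not start_text.strip().isdigit() or not end_text.strip().isdigit():
--                 return None
--             start = int(start_text.strip())
--             end = int(end_text.strip())
--             if start > end:
--                 return None
--             for value in range(start, end + 1):
--                 if not 1 <= value <= max_value: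
--                     return None
--                 values.add(value)
--             continue
--         if not token.isdigit():
--             return None
--         value = int(token)
--         if not 1 <= value <= max_value:
--             return None
--         values.add(value)
--
--     if not values:
--         return None
--     return sorted(values)
-- ===== SOURCE B (Python) =====
-- def _parse_token(token: str) -> tuple[int, int] | None:
--     """Parse one non-empty token into an (start, end) interval, or None if malformed."""
--     if "-" in token:
--         start_text, end_text = token.split("-", 1)
--         start_text, end_text = start_text.strip(), end_text.strip()
--         if not start_text.isdigit() or not end_text.isdigit():
--             return None
--         return int(start_text), int(end_text)
--     if token.isdigit():
--         value = int(token)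
--         return value, value
--     return None
--
--
-- def _parse_library_selection(selection: str, max_value: int) -> list[int] | None:
--     # Pass 1: parse every token into a validated (start, end) interval; no set is used.
--     ranges: list[tuple[int, int]] = []
--     for part in selection.split(","):
--         token = part.strip()
--         if not token:
--             continue
--         se = _parse_token(token)
--         if se is None:
--             return None
--         start, end = se
--         if start > end or start < 1 or end > max_value:
--             return None
--         ranges.append((start, end))
--     if not ranges:
--         return None
--     # Pass 2: sort intervals by start and sweep-merge overlapping ones, emitting
--     # each maximal run as a contiguous block — the output comes out sorted and
--     # duplicate-free by construction, with no set and no final sort.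
--     ranges.sort(key=lambda r: r[0])
--     result: list[int] = []
--     cur_start, cur_end = ranges[0]
--     for start, end in ranges[1:]:
--         if start <= cur_end:
--             cur_end = max(cur_end, end)
--         else:
--             result.extend(range(cur_start, cur_end + 1))
--             cur_start, cur_end = start, end
--     result.extend(range(cur_start, cur_end + 1))
--     return result
-- ===== Notes on version B (the rewrite author's own statement) =====
-- stated objective: alternative
-- what changed: A accumulates every selected value one-by-one into a set and sorts it at the end; B never builds a set: it parses tokens into validated (start,end) intervals, sorts the intervals by start, sweep-merges overlapping ones and emits each maximal run as a contiguous block, so the output is sorted and duplicate-free by construction.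
import Mathlib
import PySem

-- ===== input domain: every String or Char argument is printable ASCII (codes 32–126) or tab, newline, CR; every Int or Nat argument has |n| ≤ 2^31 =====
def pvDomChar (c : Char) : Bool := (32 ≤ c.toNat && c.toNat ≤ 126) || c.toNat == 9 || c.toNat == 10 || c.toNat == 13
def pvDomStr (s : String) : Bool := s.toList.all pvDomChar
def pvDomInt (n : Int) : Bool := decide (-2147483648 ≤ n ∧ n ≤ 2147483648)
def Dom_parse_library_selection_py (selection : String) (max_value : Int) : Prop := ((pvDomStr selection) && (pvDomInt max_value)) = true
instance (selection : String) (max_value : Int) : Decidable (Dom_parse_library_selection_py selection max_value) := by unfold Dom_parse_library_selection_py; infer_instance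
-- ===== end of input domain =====

-- B drops A's set entirely: it parses tokens into validated (start, end) intervals,
-- sorts the intervals by start and sweep-merges overlapping ones, emitting each maximal
-- run as a contiguous block, so the output is sorted and duplicate-free by construction.

-- ===== PORT A =====
-- the inner 'for value in range(start, end + 1)' loop of A
def pvInnerA (l : List Int) (mx : Int) (acc : PySem.Set Int) : Option (PySem.Set Int) :=
  match l with
  | [] => some acc
  | v :: vs => if ¬ (1 ≤ v ∧ v ≤ mx) then none else pvInnerA vs mx (PySem.Set.add acc v)

-- the 'for part in selection.split(",")' loop of A, over the list of parts
def pvLoopA (parts : List (List Char)) (mx : Int) (acc : PySem.Set Int) : Option (PySem.Set Int) :=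
  match parts with
  | [] => some acc
  | part :: rest =>
    let token := PySem.Chars.strip part
    if token = [] then pvLoopA rest mx acc
    else if PySem.Chars.isIn ['-'] token then
      match (PySem.Chars.splitMax? token ['-'] 1).getD [] with
      | [start_text, end_text] =>
        if ¬ PySem.Chars.strIsdigit (PySem.Chars.strip start_text)
           ∨ ¬ PySem.Chars.strIsdigit (PySem.Chars.strip end_text) then none
        else
          let start := (PySem.Int.ofChars? (PySem.Chars.strip start_text)).getD 0
          let «end» := (PySem.Int.ofChars? (PySem.Chars.strip end_text)).getD 0
          if start > «end» then none
          else
            match pvInnerA (PySem.List.pyRange start («end» + 1) 1) mx acc with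
            | none => none
            | some acc' => pvLoopA rest mx acc'
      | _ => none  -- unreachable: split(sep, 1) with sep present yields exactly two pieces
    else if ¬ PySem.Chars.strIsdigit token then none
    else
      let value := (PySem.Int.ofChars? token).getD 0
      if ¬ (1 ≤ value ∧ value ≤ mx) then none
      else pvLoopA rest mx (PySem.Set.add acc value)

def parse_library_selection_py (selection : String) (max_value : Int) : Option (List Int) :=
  match pvLoopA (PySem.Chars.splitOn selection.toList [',']) max_value PySem.Set.empty with
  | none => none
  | some values =>
    if values = [] then none
    else some (PySem.List.sorted values (fun x => x) false)

-- ===== PORT B =====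
-- B's helper: parse one non-empty token into an interval, or none if malformed
def pvParseTok (token : List Char) : Option (Int × Int) :=
  if PySem.Chars.isIn ['-'] token then
    match (PySem.Chars.splitMax? token ['-'] 1).getD [] with
    | [start_text, end_text] =>
      let start_text := PySem.Chars.strip start_text
      let end_text := PySem.Chars.strip end_text
      if ¬ PySem.Chars.strIsdigit start_text ∨ ¬ PySem.Chars.strIsdigit end_text then none
      else some ((PySem.Int.ofChars? start_text).getD 0, (PySem.Int.ofChars? end_text).getD 0)
    | _ => none  -- unreachable: split(sep, 1) with sep present yields exactly two pieces
  else if PySem.Chars.strIsdigit token then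
    some ((PySem.Int.ofChars? token).getD 0, (PySem.Int.ofChars? token).getD 0)
  else none

-- B's pass 1: parse every token into a validated (start, end) interval
def pvCollectB (parts : List (List Char)) (mx : Int) (acc : List (Int × Int)) :
    Option (List (Int × Int)) :=
  match parts with
  | [] => some acc
  | part :: rest =>
    let token := PySem.Chars.strip part
    if token = [] then pvCollectB rest mx acc
    else
      match pvParseTok token with
      | none => none
      | some (start, «end») =>
        if start > «end» ∨ start < 1 ∨ «end» > mx then none
        else pvCollectB rest mx (acc ++ [(start, «end»)])

-- B's pass 2: sweep-merge the sorted intervals, extending the result by each maximal run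
def pvMergeB (rest : List (Int × Int)) (cur_s cur_e : Int) (out : List Int) : List Int :=
  match rest with
  | [] => out ++ PySem.List.pyRange cur_s (cur_e + 1) 1
  | (s, e) :: rs =>
    if s ≤ cur_e then
      pvMergeB rs cur_s (max cur_e e) out
    else
      pvMergeB rs s e (out ++ PySem.List.pyRange cur_s (cur_e + 1) 1)

def parse_library_selection_py_alt (selection : String) (max_value : Int) : Option (List Int) :=
  match pvCollectB (PySem.Chars.splitOn selection.toList [',']) max_value [] with
  | none => none
  | some ranges =>
    if ranges = [] then none
    else
      match PySem.List.sorted ranges (fun r => r.1) false with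
      | [] => none  -- unreachable: sorting a nonempty list is nonempty
      | (cur_s, cur_e) :: rest => some (pvMergeB rest cur_s cur_e [])

-- ===== PRECONDITION & SPEC =====
-- A returns normally on every input (malformed selections yield None rather than an
-- exception), so Pre_ excludes nothing: both bounds below hold for every string.
def Pre_parse_library_selection_py (selection : String) (max_value : Int) : Prop :=
  0 ≤ PySem.Str.count selection "," ∧ -1 ≤ PySem.Str.find selection ","
instance (selection : String) (max_value : Int) : Decidable (Pre_parse_library_selection_py selection max_value) := by unfold Pre_parse_library_selection_py; infer_instance
def pvWitness_parse_library_selection_py : String × Int := ("1-3, 5,2-2", 10)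
def Spec_parse_library_selection_py (selection : String) (max_value : Int) (out : Option (List Int)) : Prop := out = parse_library_selection_py_alt selection max_value
instance (selection : String) (max_value : Int) (out : Option (List Int)) : Decidable (Spec_parse_library_selection_py selection max_value out) := by unfold Spec_parse_library_selection_py; infer_instance

-- ===== CLAIM (what is proved, stated in full; the proofs are below) =====
def Claim_equal_parse_library_selection_py : Prop := ∀ (selection : String) (max_value : Int), Dom_parse_library_selection_py selection max_value → Pre_parse_library_selection_py selection max_value → Spec_parse_library_selection_py selection max_value (parse_library_selection_py selection max_value)

-- ===== LEMMAS AND PROOFS =====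

-- the set a list of intervals denotes, as A folds it up
def pvFoldSet (rs : List (Int × Int)) (s : PySem.Set Int) : PySem.Set Int :=
  rs.foldl (fun a r => PySem.Set.update a (PySem.List.pyRange r.1 (r.2 + 1) 1)) s

theorem pvInnerA_spec (l : List Int) (mx : Int) (acc : PySem.Set Int) :
    pvInnerA l mx acc =
      if ∀ v ∈ l, 1 ≤ v ∧ v ≤ mx then some (PySem.Set.update acc l) else none := by
  induction l generalizing acc with
  | nil => simp [pvInnerA, PySem.Set.update]
  | cons v vs ih =>
    simp only [pvInnerA, List.mem_cons]
    by_cases h : 1 ≤ v ∧ v ≤ mx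
    · simp [h, ih, PySem.Set.update]
    · simp [h]

theorem pvInnerA_range (s e mx : Int) (acc : PySem.Set Int) (h : s ≤ e) :
    pvInnerA (PySem.List.pyRange s (e + 1) 1) mx acc =
      if s < 1 ∨ e > mx then none
      else some (PySem.Set.update acc (PySem.List.pyRange s (e + 1) 1)) := by
  rw [pvInnerA_spec]
  by_cases hb : s < 1 ∨ e > mx
  · rw [if_pos hb, if_neg]
    intro hall
    have h1 := hall s (by rw [PySem.List.mem_pyRange_one]; omega)
    have h2 := hall e (by rw [PySem.List.mem_pyRange_one]; omega)
    omega
  · rw [if_neg hb, if_pos]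
    intro v hv
    rw [PySem.List.mem_pyRange_one] at hv
    omega

-- pvCollectB only appends to its accumulator
theorem pvCollectB_acc (parts : List (List Char)) (mx : Int) (acc : List (Int × Int)) :
    pvCollectB parts mx acc = (pvCollectB parts mx []).map (acc ++ ·) := by
  induction parts generalizing acc with
  | nil => simp [pvCollectB]
  | cons part rest ih =>
    simp only [pvCollectB]
    split_ifs with h1
    · exact ih acc
    · cases pvParseTok (PySem.Chars.strip part) with
      | none => rfl
      | some se =>
        obtain ⟨s, e⟩ := se
        dsimp only
        split_ifs with h2
        · rfl
        · rw [ih (acc ++ [(s, e)]), ih ([] ++ [(s, e)]), Option.map_map]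
          simp [Function.comp_def]

-- A's loop is B's collector followed by the range-expanding fold
theorem pvLoopA_eq_collect (parts : List (List Char)) (mx : Int) (acc : PySem.Set Int) :
    pvLoopA parts mx acc = (pvCollectB parts mx []).map (fun rs => pvFoldSet rs acc) := by
  induction parts generalizing acc with
  | nil => rfl
  | cons part rest ih =>
    simp only [pvLoopA, pvCollectB, pvParseTok]
    by_cases hemp : PySem.Chars.strip part = []
    · simp only [if_pos hemp]; exact ih acc
    · simp only [if_neg hemp]
      by_cases hdash : PySem.Chars.isIn ['-'] (PySem.Chars.strip part) = true
      · simp only [if_pos hdash]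
        match hm : (PySem.Chars.splitMax? (PySem.Chars.strip part) ['-'] 1).getD [] with
        | [] => rfl
        | [_] => rfl
        | _ :: _ :: _ :: _ => rfl
        | [st, et] =>
          by_cases h1 : PySem.Chars.strIsdigit (PySem.Chars.strip st) = true
          · by_cases h2 : PySem.Chars.strIsdigit (PySem.Chars.strip et) = true
            · have hdig : ¬ (¬ PySem.Chars.strIsdigit (PySem.Chars.strip st) = true
                  ∨ ¬ PySem.Chars.strIsdigit (PySem.Chars.strip et) = true) := by
                simp [h1, h2]
              simp only [if_neg hdig]
              set s := (PySem.Int.ofChars? (PySem.Chars.strip st)).getD 0 with hs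
              set e := (PySem.Int.ofChars? (PySem.Chars.strip et)).getD 0 with he
              by_cases hse : s > e
              · have hB : s > e ∨ s < 1 ∨ e > mx := Or.inl hse
                simp [if_pos hse, if_pos hB]
              · have hse' : s ≤ e := by omega
                rw [if_neg hse, pvInnerA_range s e mx acc hse']
                by_cases hb : s < 1 ∨ e > mx
                · have hB : s > e ∨ s < 1 ∨ e > mx := Or.inr hb
                  simp [if_pos hb, if_pos hB]
                · have hB : ¬ (s > e ∨ s < 1 ∨ e > mx) := by omega
                  simp only [if_neg hb, if_neg hB]
                  rw [ih, pvCollectB_acc rest mx ([] ++ [(s, e)]), Option.map_map]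
                  rfl
            · simp [h2]
          · simp [h1]
      · simp only [if_neg hdash]
        by_cases hd : PySem.Chars.strIsdigit (PySem.Chars.strip part) = true
        · simp only [hd, not_true, if_true, if_false]
          set v := (PySem.Int.ofChars? (PySem.Chars.strip part)).getD 0 with hv
          by_cases hb : 1 ≤ v ∧ v ≤ mx
          · have hB : ¬ (v > v ∨ v < 1 ∨ v > mx) := by omega
            simp only [if_neg hB,
              if_neg (show ¬¬(1 ≤ v ∧ v ≤ mx) by simp [hb])]
            rw [ih, pvCollectB_acc rest mx ([] ++ [(v, v)]), Option.map_map]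
            have : PySem.Set.add acc v =
                PySem.Set.update acc (PySem.List.pyRange v (v + 1) 1) := by
              simp [PySem.List.pyRange_one_singleton, PySem.Set.update]
            rw [this]
            simp [Function.comp_def, pvFoldSet]
          · have hB : v > v ∨ v < 1 ∨ v > mx := by omega
            simp [hb]
        · simp [hd]

-- every interval pvCollectB keeps was validated by its endpoint test
theorem pvCollectB_valid (parts : List (List Char)) (mx : Int) (acc rs : List (Int × Int))
    (hacc : ∀ r ∈ acc, 1 ≤ r.1 ∧ r.1 ≤ r.2 ∧ r.2 ≤ mx)
    (h : pvCollectB parts mx acc = some rs) :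
    ∀ r ∈ rs, 1 ≤ r.1 ∧ r.1 ≤ r.2 ∧ r.2 ≤ mx := by
  induction parts generalizing acc with
  | nil =>
    simp only [pvCollectB, Option.some.injEq] at h
    exact h ▸ hacc
  | cons part rest ih =>
    simp only [pvCollectB] at h
    split_ifs at h with h1
    · exact ih acc hacc h
    · revert h
      cases pvParseTok (PySem.Chars.strip part) with
      | none => intro h; cases h
      | some se =>
        obtain ⟨s, e⟩ := se
        dsimp only
        split_ifs with h2
        · intro h; cases h
        · intro h
          refine ih (acc ++ [(s, e)]) ?_ h
          intro r hr
          rcases List.mem_append.mp hr with hr | hr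
          · exact hacc r hr
          · simp only [List.mem_singleton] at hr
            subst hr; exact ⟨by omega, by omega, by omega⟩

-- membership in the fold of interval updates
theorem mem_pvFoldSet (rs : List (Int × Int)) (s : PySem.Set Int) (v : Int) :
    v ∈ pvFoldSet rs s ↔ v ∈ s ∨ ∃ r ∈ rs, r.1 ≤ v ∧ v ≤ r.2 := by
  induction rs generalizing s with
  | nil => simp [pvFoldSet]
  | cons r rs ih =>
    simp only [pvFoldSet, List.foldl_cons] at *
    rw [ih, PySem.Set.mem_update, PySem.List.mem_pyRange_one]
    constructor
    · rintro (⟨h | h⟩ | h)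
      · exact Or.inl h
      · exact Or.inr ⟨r, List.mem_cons_self .., by omega⟩
      · obtain ⟨r', hr', h'⟩ := h
        exact Or.inr ⟨r', List.mem_cons_of_mem _ hr', h'⟩
    · rintro (h | ⟨r', hr', h'⟩)
      · exact Or.inl (Or.inl h)
      · rcases List.mem_cons.mp hr' with rfl | hr'
        · exact Or.inl (Or.inr (by omega))
        · exact Or.inr ⟨r', hr', h'⟩

theorem nodup_pvFoldSet (rs : List (Int × Int)) (s : PySem.Set Int) (h : s.Nodup) :
    (pvFoldSet rs s).Nodup := by
  induction rs generalizing s with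
  | nil => exact h
  | cons r rs ih => exact ih _ (PySem.Set.nodup_update _ _ h)

-- membership in the sweep-merge output
theorem mem_pvMergeB (rest : List (Int × Int)) (cs ce : Int) (out : List Int) (v : Int)
    (hfst : ∀ r ∈ rest, cs ≤ r.1) (hval : ∀ r ∈ rest, r.1 ≤ r.2)
    (hsorted : rest.Pairwise (fun a b => a.1 ≤ b.1)) :
    v ∈ pvMergeB rest cs ce out ↔
      v ∈ out ∨ (cs ≤ v ∧ v ≤ ce) ∨ ∃ r ∈ rest, r.1 ≤ v ∧ v ≤ r.2 := by
  induction rest generalizing cs ce out with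
  | nil => simp [pvMergeB, PySem.List.mem_pyRange_one]
  | cons r rs ih =>
    obtain ⟨s, e⟩ := r
    rw [List.pairwise_cons] at hsorted
    have hs : cs ≤ s := hfst (s, e) (List.mem_cons_self ..)
    have hse : s ≤ e := hval (s, e) (List.mem_cons_self ..)
    simp only [pvMergeB]
    split_ifs with hle
    · rw [ih _ _ _ (fun r hr => le_trans hs (hsorted.1 r hr))
        (fun r hr => hval r (List.mem_cons_of_mem _ hr)) hsorted.2]
      simp only [List.mem_cons]
      constructor
      · rintro (h | h | ⟨r', hr', h'⟩)
        · exact Or.inl h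
        · by_cases hv' : v ≤ ce
          · exact Or.inr (Or.inl ⟨h.1, hv'⟩)
          · exact Or.inr (Or.inr ⟨(s, e), Or.inl rfl, by omega, by omega⟩)
        · exact Or.inr (Or.inr ⟨r', Or.inr hr', h'⟩)
      · rintro (h | h | ⟨r', hr', h'⟩)
        · exact Or.inl h
        · exact Or.inr (Or.inl ⟨h.1, by omega⟩)
        · rcases hr' with rfl | hr'
          · exact Or.inr (Or.inl ⟨by omega, by omega⟩)
          · exact Or.inr (Or.inr ⟨r', hr', h'⟩)
    · rw [ih _ _ _ (fun r hr => hsorted.1 r hr)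
        (fun r hr => hval r (List.mem_cons_of_mem _ hr)) hsorted.2]
      simp only [List.mem_append, PySem.List.mem_pyRange_one, List.mem_cons]
      constructor
      · rintro ((h | h) | h | ⟨r', hr', h'⟩)
        · exact Or.inl h
        · exact Or.inr (Or.inl (by omega))
        · exact Or.inr (Or.inr ⟨(s, e), Or.inl rfl, by omega, by omega⟩)
        · exact Or.inr (Or.inr ⟨r', Or.inr hr', h'⟩)
      · rintro (h | h | ⟨r', hr', h'⟩)
        · exact Or.inl (Or.inl h)
        · exact Or.inl (Or.inr (by omega))
        · rcases hr' with rfl | hr'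
          · exact Or.inr (Or.inl (by omega))
          · exact Or.inr (Or.inr ⟨r', hr', h'⟩)

-- the sweep-merge output is strictly increasing
theorem pairwise_pvMergeB (rest : List (Int × Int)) (cs ce : Int) (out : List Int)
    (hout : out.Pairwise (· < ·)) (hlt : ∀ x ∈ out, x < cs) (hce : cs ≤ ce)
    (hfst : ∀ r ∈ rest, cs ≤ r.1) (hval : ∀ r ∈ rest, r.1 ≤ r.2)
    (hsorted : rest.Pairwise (fun a b => a.1 ≤ b.1)) :
    (pvMergeB rest cs ce out).Pairwise (· < ·) := by
  induction rest generalizing cs ce out with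
  | nil =>
    simp only [pvMergeB]
    refine List.pairwise_append.mpr ⟨hout, PySem.List.pairwise_lt_pyRange_one .., ?_⟩
    intro a ha b hb
    rw [PySem.List.mem_pyRange_one] at hb
    exact lt_of_lt_of_le (hlt a ha) hb.1
  | cons r rs ih =>
    obtain ⟨s, e⟩ := r
    rw [List.pairwise_cons] at hsorted
    have hs : cs ≤ s := hfst (s, e) (List.mem_cons_self ..)
    have hse : s ≤ e := hval (s, e) (List.mem_cons_self ..)
    simp only [pvMergeB]
    split_ifs with hle
    · exact ih _ _ _ hout hlt (by omega)
        (fun r hr => le_trans hs (hsorted.1 r hr))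
        (fun r hr => hval r (List.mem_cons_of_mem _ hr)) hsorted.2
    · refine ih _ _ _ ?_ ?_ hse (fun r hr => hsorted.1 r hr)
        (fun r hr => hval r (List.mem_cons_of_mem _ hr)) hsorted.2
      · refine List.pairwise_append.mpr ⟨hout, PySem.List.pairwise_lt_pyRange_one .., ?_⟩
        intro a ha b hb
        rw [PySem.List.mem_pyRange_one] at hb
        exact lt_of_lt_of_le (hlt a ha) hb.1
      · intro x hx
        rcases List.mem_append.mp hx with hx | hx
        · exact lt_trans (hlt x hx) (by omega)
        · rw [PySem.List.mem_pyRange_one] at hx; omega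

-- ===== VERDICT (by name: the statement is the Claim_ definition above) =====
theorem parse_library_selection_py_spec : Claim_equal_parse_library_selection_py := by
  intro selection max_value _ _
  unfold Spec_parse_library_selection_py parse_library_selection_py parse_library_selection_py_alt
  rw [pvLoopA_eq_collect]
  cases hc : pvCollectB (PySem.Chars.splitOn selection.toList [',']) max_value [] with
  | none => rfl
  | some rs =>
    simp only [Option.map_some]
    have hval : ∀ r ∈ rs, 1 ≤ r.1 ∧ r.1 ≤ r.2 ∧ r.2 ≤ max_value :=
      pvCollectB_valid _ _ _ _ (by simp) hc
    cases rs with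
    | nil => rfl
    | cons r0 rs' =>
      have hne : (r0 :: rs') ≠ [] := by simp
      rw [if_neg hne]
      -- the fold set is nonempty: r0.1 is in it
      have hmem0 : r0.1 ∈ pvFoldSet (r0 :: rs') PySem.Set.empty := by
        rw [mem_pvFoldSet]
        exact Or.inr ⟨r0, List.mem_cons_self .., le_refl _,
          (hval r0 (List.mem_cons_self ..)).2.1⟩
      have hSne : pvFoldSet (r0 :: rs') PySem.Set.empty ≠ [] := by
        intro h; rw [h] at hmem0; cases hmem0
      rw [if_neg hSne]
      -- analyse the sorted interval list
      cases hsrt : PySem.List.sorted (r0 :: rs') (fun r => r.1) false with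
      | nil => exact absurd ((PySem.List.sorted_eq_nil_iff _ _ _).mp hsrt) hne
      | cons c rest =>
        obtain ⟨cs, ce⟩ := c
        have hperm : ((cs, ce) :: rest).Perm (r0 :: rs') := by
          rw [← hsrt]; exact PySem.List.sorted_perm ..
        have hpw : ((cs, ce) :: rest).Pairwise (fun a b => a.1 ≤ b.1) := by
          rw [← hsrt]; exact PySem.List.sorted_pairwise ..
        rw [List.pairwise_cons] at hpw
        have hval' : ∀ r ∈ (cs, ce) :: rest, 1 ≤ r.1 ∧ r.1 ≤ r.2 ∧ r.2 ≤ max_value :=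
          fun r hr => hval r (hperm.mem_iff.mp hr)
        have hce : cs ≤ ce := (hval' (cs, ce) (List.mem_cons_self ..)).2.1
        have hrest_fst : ∀ r ∈ rest, cs ≤ r.1 := hpw.1
        have hrest_val : ∀ r ∈ rest, r.1 ≤ r.2 :=
          fun r hr => (hval' r (List.mem_cons_of_mem _ hr)).2.1
        -- the merged output
        set M := pvMergeB rest cs ce [] with hM
        have hMpw : M.Pairwise (· < ·) :=
          pairwise_pvMergeB rest cs ce [] (by simp) (by simp) hce hrest_fst hrest_val hpw.2
        have hMnd : M.Nodup := hMpw.imp ne_of_lt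
        have hSnd : (pvFoldSet (r0 :: rs') PySem.Set.empty).Nodup :=
          nodup_pvFoldSet _ _ (by simp [PySem.Set.empty])
        have hMmem : ∀ v, v ∈ M ↔ v ∈ pvFoldSet (r0 :: rs') PySem.Set.empty := by
          intro v
          rw [hM, mem_pvMergeB rest cs ce [] v hrest_fst hrest_val hpw.2, mem_pvFoldSet]
          simp only [List.not_mem_nil, false_or, PySem.Set.empty]
          constructor
          · rintro (h | ⟨r', hr', h'⟩)
            · exact ⟨(cs, ce), hperm.mem_iff.mp (List.mem_cons_self ..), h⟩
            · exact ⟨r', hperm.mem_iff.mp (List.mem_cons_of_mem _ hr'), h'⟩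
          · rintro ⟨r', hr', h'⟩
            have : r' ∈ (cs, ce) :: rest := hperm.mem_iff.mpr hr'
            rcases List.mem_cons.mp this with rfl | hmem
            · exact Or.inl h'
            · exact Or.inr ⟨r', hmem, h'⟩
        have hMperm : M.Perm (pvFoldSet (r0 :: rs') PySem.Set.empty) :=
          (List.perm_ext_iff_of_nodup hMnd hSnd).mpr hMmem
        show some (PySem.List.sorted (pvFoldSet (r0 :: rs') PySem.Set.empty) (fun x => x) false)
          = some (pvMergeB rest cs ce [])
        exact congrArg some (PySem.List.sorted_eq_of_perm_of_pairwise_lt _ _ _ hMperm hMpw)
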